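-- pv_equiv track=rewrite | github.com/La-sociedad-del-silencio/TP2-Dinamica | codigo/algoritmo.py | eliminar_enemigos
-- ===== SOURCE A (Python) =====
-- CARGAR = "Cargar"
--
-- ATACAR = "Atacar"
--
-- def eliminar_enemigos(n,x,f):
--     """
--     Algoritmo de programación dinámica para determinar la cantidad máxima de
--     enemigos que pueden ser derrotados. Utiliza obtener_secuencia_estrategias()
--     para reconstruir las estrategias de ataque empleadas.
--
--     Recibe: n >= 0 y las listas x y f, cuyo tamaño es n. f toma valores
--     monótonos crecientes.
--     Devuelve: cantidad de enemigos eliminados y secuencia de estrategias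
--     """
--     enemigos_eliminados = [0] * (n + 1)
--
--     for minuto_actual in range(1, n + 1):
--         max_enemigos_eliminables = min(f[0], x[minuto_actual-1])
--         for minutos_desde_ultimo_ataque in range(minuto_actual):
--             enemigos_actuales = min(f[minutos_desde_ultimo_ataque], x[minuto_actual-1])
--             offset = minuto_actual-minutos_desde_ultimo_ataque-1
--             enemigos_ataque_anterior = enemigos_eliminados[offset]
--
--             if enemigos_ataque_anterior + enemigos_actuales > max_enemigos_eliminables:
--                 max_enemigos_eliminables = enemigos_ataque_anterior + enemigos_actuales
--
--         enemigos_eliminados[minuto_actual] = max_enemigos_eliminables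
--
--     max_enemigos = enemigos_eliminados[-1]
--     secuencia = obtener_secuencia_estrategias(x, f, enemigos_eliminados, n)
--     secuencia.reverse()
--     return (max_enemigos, secuencia)
--
-- def obtener_secuencia_estrategias(x, f, enemigos_eliminados, minuto_actual):
--     """
--     Reconstruye la secuencia de estrategias usada para eliminar la mayor cantidad de
--     enemigos.
--     Empieza por el último minuto de combate sabiendo que la estrategia es 'atacar'.
--     Comparando valores del arreglo de óptimos 'enemigos_eliminados', busca el minuto
--     en el que se realizó el ataque anterior. Mientras que no lo encuentra, la estrategia
--     es 'cargar'. Repite hasta llegar al minuto 0.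
--     """
--     secuencia = []
--     while minuto_actual > 0:
--
--         secuencia.append(ATACAR)
--
--         for minutos_desde_ultimo_ataque in range(minuto_actual):
--
--             offsetMins = minuto_actual-minutos_desde_ultimo_ataque-1
--             enemigos_ataque_anterior = enemigos_eliminados[offsetMins]
--
--             cantReales = min(f[minutos_desde_ultimo_ataque], x[minuto_actual-1])
--             enemigos_actuales = cantReales
--
--             enemigosDerrotados = enemigos_ataque_anterior + enemigos_actuales
--             esIgual = enemigosDerrotados == enemigos_eliminados[minuto_actual]
--             if esIgual:
--                 minuto_actual = minuto_actual-minutos_desde_ultimo_ataque-1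
--                 break
--             else:
--                 secuencia.append(CARGAR)
--
--     return secuencia
-- ===== SOURCE B (Python) =====
-- CARGAR = "Cargar"
--
-- ATACAR = "Atacar"
--
-- def eliminar_enemigos(n, x, f):
--     """Same DP recurrence, but records a parent pointer best_j[i] (the first
--     j achieving the optimum of minute i) during the DP, so the strategy is
--     reconstructed in one backward pass with no inner rescanning."""
--     dp = [0] * (n + 1)
--     best_j = [0] * (n + 1)
--
--     for i in range(1, n + 1):
--         cur = min(f[0], x[i - 1])
--         best = None
--         for j in range(i):
--             cand = dp[i - j - 1] + min(f[j], x[i - 1])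
--             if cand > cur:
--                 cur = cand
--                 best = j
--             elif best is None and cand == cur:
--                 best = j
--         dp[i] = cur
--         best_j[i] = best if best is not None else 0
--
--     secuencia = []
--     i = n
--     while i > 0:
--         j = best_j[i]
--         secuencia.append(ATACAR)
--         secuencia.extend([CARGAR] * j)
--         i = i - j - 1
--     secuencia.reverse()
--     return (dp[n], secuencia)
-- ===== Notes on version B (the rewrite author's own statement) =====
-- stated objective: alternative
-- what changed: B records a parent pointer best_j[i] (the first argmax j) while running the same DP recurrence, replacing A's reconstruction helper that rescans all j candidates at every attack minute with a single backward walk over the parent array.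
import Mathlib
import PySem

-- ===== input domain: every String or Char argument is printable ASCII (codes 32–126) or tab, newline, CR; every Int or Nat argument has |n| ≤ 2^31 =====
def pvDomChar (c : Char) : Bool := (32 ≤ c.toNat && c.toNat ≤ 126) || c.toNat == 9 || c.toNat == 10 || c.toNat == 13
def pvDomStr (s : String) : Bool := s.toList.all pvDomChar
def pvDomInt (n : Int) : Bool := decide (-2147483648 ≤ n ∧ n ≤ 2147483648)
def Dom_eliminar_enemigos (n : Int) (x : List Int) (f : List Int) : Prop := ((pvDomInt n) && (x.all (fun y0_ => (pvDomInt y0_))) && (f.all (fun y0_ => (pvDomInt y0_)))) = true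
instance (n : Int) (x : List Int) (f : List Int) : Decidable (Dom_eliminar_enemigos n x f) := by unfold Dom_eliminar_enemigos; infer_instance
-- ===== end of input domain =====

-- B records a parent pointer (the first argmax j) during the same DP recurrence, so the
-- strategy is rebuilt by one backward walk instead of A's per-attack rescan of all j.
-- (objective: alternative; A's reconstruction while-loop can run forever on inputs outside Pre_.)

-- ===== PORT A =====
-- inner 'for minutos_desde_ultimo_ataque in range(minuto_actual)' of A's DP loop
def pvAInner (dp f : List Int) (xi i : Int) : Int :=
  (PySem.List.pyRange 0 i 1).foldl
    (fun mx j =>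
      let c := PySem.List.pyGetD dp (i - j - 1) 0 + min (PySem.List.pyGetD f j 0) xi
      if c > mx then c else mx)
    (min (PySem.List.pyGetD f 0 0) xi)

-- the DP table 'enemigos_eliminados'
def pvADP (n : Int) (x f : List Int) : List Int :=
  (PySem.List.pyRange 1 (n + 1) 1).foldl
    (fun dp i => PySem.List.pySetD dp i (pvAInner dp f (PySem.List.pyGetD x (i - 1) 0) i))
    (List.replicate (n + 1).toNat 0)

-- the inner for-loop (with break) of obtener_secuencia_estrategias: emitted "Cargar"s and,
-- if a match was found, the new minuto_actual
def pvAFind (dp f : List Int) (xi tgt i : Int) : List Int → (List String × Option Int)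
  | [] => ([], none)
  | j :: js =>
    if PySem.List.pyGetD dp (i - j - 1) 0 + min (PySem.List.pyGetD f j 0) xi = tgt then
      ([], some (i - j - 1))
    else
      let r := pvAFind dp f xi tgt i js
      ("Cargar" :: r.1, r.2)

-- the while-loop of obtener_secuencia_estrategias (fuel-bounded: each step strictly
-- decreases minuto_actual; if no match is found Python loops forever — excluded by Pre_)
def pvARecon (dp x f : List Int) : Nat → Int → List String
  | 0, _ => []
  | fuel + 1, i =>
    if i > 0 then
      let r := pvAFind dp f (PySem.List.pyGetD x (i - 1) 0) (PySem.List.pyGetD dp i 0) i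
                 (PySem.List.pyRange 0 i 1)
      match r.2 with
      | some i' => "Atacar" :: (r.1 ++ pvARecon dp x f fuel i')
      | none => "Atacar" :: r.1
    else []

def eliminar_enemigos (n : Int) (x : List Int) (f : List Int) : Int × List String :=
  let dp := pvADP n x f
  (PySem.List.pyGetD dp (-1) 0, (pvARecon dp x f n.toNat n).reverse)

-- ===== PORT B =====
-- inner loop of B's DP: same running maximum plus the first argmax j (best)
def pvBInner (dp f : List Int) (xi i : Int) : Int × Option Int :=
  (PySem.List.pyRange 0 i 1).foldl
    (fun st j =>
      let c := PySem.List.pyGetD dp (i - j - 1) 0 + min (PySem.List.pyGetD f j 0) xi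
      if c > st.1 then (c, some j)
      else if st.2 = none ∧ c = st.1 then (st.1, some j)
      else st)
    (min (PySem.List.pyGetD f 0 0) xi, none)

-- B's DP loop filling dp and the parent array best_j
def pvBDP (n : Int) (x f : List Int) : List Int × List Int :=
  (PySem.List.pyRange 1 (n + 1) 1).foldl
    (fun st i =>
      let r := pvBInner st.1 f (PySem.List.pyGetD x (i - 1) 0) i
      (PySem.List.pySetD st.1 i r.1, PySem.List.pySetD st.2 i (r.2.getD 0)))
    (List.replicate (n + 1).toNat 0, List.replicate (n + 1).toNat 0)

-- B's backward walk over the parent array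
def pvBRecon (bj : List Int) : Nat → Int → List String
  | 0, _ => []
  | fuel + 1, i =>
    if i > 0 then
      let j := PySem.List.pyGetD bj i 0
      "Atacar" :: (List.replicate j.toNat "Cargar" ++ pvBRecon bj fuel (i - j - 1))
    else []

def eliminar_enemigos_alt (n : Int) (x : List Int) (f : List Int) : Int × List String :=
  let st := pvBDP n x f
  (PySem.List.pyGetD st.1 n 0, (pvBRecon st.2 n.toNat n).reverse)

-- ===== PRECONDITION & SPEC =====
-- Pre_ excludes inputs where A raises (n < 0 or lists shorter than n) and, because A's
-- reconstruction loop can run forever, restricts to a closed-form sufficient condition for a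
-- predecessor match to exist at every minute (the documented domain — monotone f — satisfies
-- it); this does exclude some irregular inputs on which A happens to return (see cites).
def Pre_eliminar_enemigos (n : Int) (x : List Int) (f : List Int) : Prop :=
  0 ≤ n ∧ n ≤ x.length ∧ n ≤ f.length ∧
  ∀ i ∈ PySem.List.pyRange 2 (n + 1) 1,
    PySem.List.pyGetD f 0 0 ≤ PySem.List.pyGetD f (i - 1) 0 ∨
    0 ≤ min (PySem.List.pyGetD f 0 0) (PySem.List.pyGetD x (i - 2) 0) ∨
    0 ≤ min (PySem.List.pyGetD f (i - 2) 0) (PySem.List.pyGetD x (i - 2) 0)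
instance (n : Int) (x : List Int) (f : List Int) : Decidable (Pre_eliminar_enemigos n x f) := by
  unfold Pre_eliminar_enemigos; infer_instance

def pvWitness_eliminar_enemigos : Int × List Int × List Int := (3, [2, 5, 1], [1, 2, 4])

def Spec_eliminar_enemigos (n : Int) (x : List Int) (f : List Int) (out : Int × List String) : Prop := out = eliminar_enemigos_alt n x f
instance (n : Int) (x : List Int) (f : List Int) (out : Int × List String) : Decidable (Spec_eliminar_enemigos n x f out) := by unfold Spec_eliminar_enemigos; infer_instance

-- ===== CLAIM (what is proved, stated in full; the proofs are below) =====
def Claim_equal_eliminar_enemigos : Prop := ∀ (n : Int) (x : List Int) (f : List Int), Dom_eliminar_enemigos n x f → Pre_eliminar_enemigos n x f → Spec_eliminar_enemigos n x f (eliminar_enemigos n x f)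

-- ===== LEMMAS AND PROOFS =====

-- the candidate value read by both inner loops and by A's reconstruction scan
def pvC (dp f : List Int) (xi i j : Int) : Int :=
  PySem.List.pyGetD dp (i - j - 1) 0 + min (PySem.List.pyGetD f j 0) xi

-- abstract forms of the two inner folds
def pvFoldA (c : Int → Int) (s0 : Int) (js : List Int) : Int :=
  js.foldl (fun mx j => if c j > mx then c j else mx) s0

def pvFoldB (c : Int → Int) (s0 : Int) (js : List Int) : Int × Option Int :=
  js.foldl
    (fun st j =>
      if c j > st.1 then (c j, some j)
      else if st.2 = none ∧ c j = st.1 then (st.1, some j)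
      else st)
    (s0, none)

theorem pvAInner_eq (dp f : List Int) (xi i : Int) :
    pvAInner dp f xi i =
      pvFoldA (pvC dp f xi i) (min (PySem.List.pyGetD f 0 0) xi) (PySem.List.pyRange 0 i 1) := rfl

theorem pvBInner_eq (dp f : List Int) (xi i : Int) :
    pvBInner dp f xi i =
      pvFoldB (pvC dp f xi i) (min (PySem.List.pyGetD f 0 0) xi) (PySem.List.pyRange 0 i 1) := rfl

-- characterisation of B's inner fold against A's
theorem pvFoldB_char (c : Int → Int) (s0 : Int) (js : List Int) :
    (pvFoldB c s0 js).1 = pvFoldA c s0 js ∧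
    s0 ≤ pvFoldA c s0 js ∧
    (∀ j ∈ js, c j ≤ pvFoldA c s0 js) ∧
    (pvFoldA c s0 js = s0 ∨ ∃ j ∈ js, c j = pvFoldA c s0 js) ∧
    (pvFoldB c s0 js).2 = js.find? (fun j => c j == pvFoldA c s0 js) := by
  induction js using List.reverseRecOn with
  | nil => simp [pvFoldA, pvFoldB]
  | append_singleton js j ih =>
    obtain ⟨h1, h2, h3, h4, h5⟩ := ih
    have hA : pvFoldA c s0 (js ++ [j]) =
        if c j > pvFoldA c s0 js then c j else pvFoldA c s0 js := by
      simp [pvFoldA, List.foldl_append]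
    have hB : pvFoldB c s0 (js ++ [j]) =
        (let st := pvFoldB c s0 js;
         if c j > st.1 then (c j, some j)
         else if st.2 = none ∧ c j = st.1 then (st.1, some j)
         else st) := by
      simp [pvFoldB, List.foldl_append]
    by_cases hc : c j > pvFoldA c s0 js
    · -- strict update
      have hA' : pvFoldA c s0 (js ++ [j]) = c j := by rw [hA]; simp [hc]
      have hB' : pvFoldB c s0 (js ++ [j]) = (c j, some j) := by
        rw [hB]; simp only [h1]; simp [hc]
      refine ⟨by simp [hA', hB'], by rw [hA']; omega, ?_, ?_, ?_⟩
      · intro a ha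
        rw [hA']
        rcases List.mem_append.1 ha with h | h
        · have := h3 a h; omega
        · simp at h; subst h; omega
      · right; exact ⟨j, by simp, by rw [hA']⟩
      · rw [hA', hB']
        rw [List.find?_append]
        have hnone : js.find? (fun a => c a == c j) = none := by
          rw [List.find?_eq_none]
          intro a ha
          have := h3 a ha
          simp only [beq_iff_eq]
          omega
        simp [hnone]
    · -- no update
      have hA' : pvFoldA c s0 (js ++ [j]) = pvFoldA c s0 js := by rw [hA]; simp [hc]
      have hc' : ¬ c j > (pvFoldB c s0 js).1 := by rw [h1]; exact hc
      refine ⟨?_, by rw [hA']; exact h2, ?_, ?_, ?_⟩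
      · rw [hA', hB]
        simp only [if_neg hc']
        split <;> exact h1
      · intro a ha
        rw [hA']
        rcases List.mem_append.1 ha with h | h
        · exact h3 a h
        · simp at h; subst h; omega
      · rw [hA']
        rcases h4 with h | ⟨a, ha, hb⟩
        · left; exact h
        · right; exact ⟨a, List.mem_append_left _ ha, hb⟩
      · rw [hA', hB]
        rw [List.find?_append, ← h5]
        simp only [if_neg hc']
        rcases hsome : (pvFoldB c s0 js).2 with _ | j0
        · by_cases he : c j = pvFoldA c s0 js
          · simp only [h1]
            simp [he]
          · simp only [h1]
            simp only [List.find?_singleton, beq_iff_eq, he, if_false]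
            exact hsome
        · simp [hsome, h1]

theorem pvAFind_eq (dp f : List Int) (xi tgt i : Int) (js : List Int) :
    pvAFind dp f xi tgt i js =
      ((js.takeWhile (fun j => !(pvC dp f xi i j == tgt))).map (fun _ => "Cargar"),
       (js.find? (fun j => pvC dp f xi i j == tgt)).map (fun j => i - j - 1)) := by
  induction js with
  | nil => rfl
  | cons j js ih =>
    by_cases h : pvC dp f xi i j = tgt
    · simp [pvAFind, pvC] at h ⊢
      simp [h]
    · simp only [pvAFind, pvC] at h ⊢
      rw [if_neg h]
      simp only [List.takeWhile_cons, List.find?_cons]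
      have hb : ((PySem.List.pyGetD dp (i - j - 1) 0 + min (PySem.List.pyGetD f j 0) xi == tgt)) = false := by
        simp [h]
      simp [hb, ih, pvC]

theorem pvTakeWhile_length_pyRange (p : Int → Bool) (k : Nat) :
    ∀ (a b j0 : Int), (b - a).toNat = k →
      (PySem.List.pyRange a b 1).find? p = some j0 →
      ((PySem.List.pyRange a b 1).takeWhile (fun j => !(p j))).length = (j0 - a).toNat := by
  induction k with
  | zero =>
    intro a b j0 hk hf
    rw [PySem.List.pyRange_one_eq_nil (by omega)] at hf
    simp at hf
  | succ k ih =>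
    intro a b j0 hk hf
    have hab : a < b := by omega
    rw [PySem.List.pyRange_one_cons hab] at hf ⊢
    by_cases hp : p a
    · rw [List.find?_cons_of_pos hp] at hf
      injection hf with hf; subst hf
      simp [hp]
    · rw [List.find?_cons_of_neg (by simp [hp])] at hf
      have hmem := List.mem_of_find?_eq_some hf
      have hj0 : a + 1 ≤ j0 := (PySem.List.mem_pyRange_one.1 hmem).1
      have := ih (a + 1) b j0 (by omega) hf
      simp only [List.takeWhile_cons, hp]
      simp only [Bool.not_false, if_true]
      simp [this]
      omega

theorem pvMap_const_cargar {α : Type} (l : List α) :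
    l.map (fun _ => ("Cargar" : String)) = List.replicate l.length "Cargar" := by
  induction l with
  | nil => rfl
  | cons a l ih => simp [List.map, List.replicate, ih]

-- ===== DP construction machinery =====

-- B's DP loop body and its partial runs
def pvStepB (f x : List Int) (st : List Int × List Int) (i : Int) : List Int × List Int :=
  let r := pvBInner st.1 f (PySem.List.pyGetD x (i - 1) 0) i
  (PySem.List.pySetD st.1 i r.1, PySem.List.pySetD st.2 i (r.2.getD 0))

def pvUpTo (n : Int) (x f : List Int) (m : Int) : List Int × List Int :=
  (PySem.List.pyRange 1 (m + 1) 1).foldl (pvStepB f x)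
    (List.replicate (n + 1).toNat 0, List.replicate (n + 1).toNat 0)

theorem pvBDP_eq_upTo (n : Int) (x f : List Int) : pvBDP n x f = pvUpTo n x f n := rfl

theorem pvGetD_setD_lt (l : List Int) (i k v : Int) (h0 : 0 ≤ k) (hki : k < i) :
    PySem.List.pyGetD (PySem.List.pySetD l i v) k 0 = PySem.List.pyGetD l k 0 := by
  rw [PySem.List.pySetD_of_nonneg l v (by omega : (0:Int) ≤ i)]
  have hk : k = ((k.toNat : Nat) : Int) := by omega
  rw [hk, PySem.List.pyGetD_natCast, PySem.List.pyGetD_natCast]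
  rcases lt_or_ge k.toNat l.length with h | h
  · rw [List.getD_eq_getElem _ _ (by simpa using h), List.getD_eq_getElem _ _ h]
    exact List.getElem_set_ne (by omega) _
  · rw [List.getD_eq_default _ _ (by simpa using h), List.getD_eq_default _ _ h]

theorem pvGetD_setD_self (l : List Int) (i v : Int) (h0 : 0 ≤ i) (hi : i < (l.length : Int)) :
    PySem.List.pyGetD (PySem.List.pySetD l i v) i 0 = v := by
  rw [PySem.List.pySetD_of_nonneg l v h0]
  have hk : i = ((i.toNat : Nat) : Int) := by omega
  rw [hk, PySem.List.pyGetD_natCast]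
  rw [List.getD_eq_getElem _ _ (by simp; omega)]
  exact List.getElem_set_self _

theorem pvFold_lengths (f x : List Int) (js : List Int) :
    ∀ st : List Int × List Int,
      ((js.foldl (pvStepB f x) st).1.length = st.1.length ∧
       (js.foldl (pvStepB f x) st).2.length = st.2.length) := by
  induction js with
  | nil => intro st; exact ⟨rfl, rfl⟩
  | cons j js ih =>
    intro st
    have := ih (pvStepB f x st j)
    simpa [pvStepB, PySem.List.length_pySetD] using this

theorem pvFold_stable (f x : List Int) (js : List Int) :
    ∀ (st : List Int × List Int) (m : Int), (∀ j ∈ js, m < j) → ∀ k, 0 ≤ k → k ≤ m →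
      (PySem.List.pyGetD (js.foldl (pvStepB f x) st).1 k 0 = PySem.List.pyGetD st.1 k 0 ∧
       PySem.List.pyGetD (js.foldl (pvStepB f x) st).2 k 0 = PySem.List.pyGetD st.2 k 0) := by
  induction js with
  | nil => intro st m _ k _ _; exact ⟨rfl, rfl⟩
  | cons j js ih =>
    intro st m hm k hk0 hkm
    have hj : m < j := hm j (by simp)
    have := ih (pvStepB f x st j) m (fun a ha => hm a (by simp [ha])) k hk0 hkm
    rw [List.foldl_cons]
    refine ⟨this.1.trans ?_, this.2.trans ?_⟩
    · exact pvGetD_setD_lt _ _ _ _ hk0 (by omega)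
    · exact pvGetD_setD_lt _ _ _ _ hk0 (by omega)

theorem pvBDP_split (n : Int) (x f : List Int) (m : Int) (h0 : 0 ≤ m) (hm : m ≤ n) :
    pvBDP n x f = (PySem.List.pyRange (m + 1) (n + 1) 1).foldl (pvStepB f x) (pvUpTo n x f m) := by
  rw [pvBDP_eq_upTo, pvUpTo, pvUpTo,
    PySem.List.pyRange_one_append 1 (m + 1) (n + 1) (by omega) (by omega), List.foldl_append]

theorem pvUpTo_succ (n : Int) (x f : List Int) (m : Int) (h0 : 0 ≤ m) :
    pvUpTo n x f (m + 1) = pvStepB f x (pvUpTo n x f m) (m + 1) := by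
  rw [pvUpTo, pvUpTo, show m + 1 + 1 = (m + 1) + 1 from rfl,
    PySem.List.pyRange_one_succ_right (by omega : (1:Int) ≤ m + 1), List.foldl_append]
  rfl

theorem pvUpTo_lengths (n : Int) (x f : List Int) (m : Int) :
    (pvUpTo n x f m).1.length = (n + 1).toNat ∧ (pvUpTo n x f m).2.length = (n + 1).toNat := by
  simpa using pvFold_lengths f x (PySem.List.pyRange 1 (m + 1) 1)
    (List.replicate (n + 1).toNat 0, List.replicate (n + 1).toNat 0)

theorem pvBDP_agree (n : Int) (x f : List Int) (m k : Int) (h0 : 0 ≤ k) (hk : k ≤ m) (hm : m ≤ n) :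
    (PySem.List.pyGetD (pvBDP n x f).1 k 0 = PySem.List.pyGetD (pvUpTo n x f m).1 k 0 ∧
     PySem.List.pyGetD (pvBDP n x f).2 k 0 = PySem.List.pyGetD (pvUpTo n x f m).2 k 0) := by
  rw [pvBDP_split n x f m (by omega) hm]
  exact pvFold_stable f x _ _ m
    (fun j hj => by have := (PySem.List.mem_pyRange_one.1 hj).1; omega) k h0 hk

-- folds only depend on the candidate values on the list
theorem pvFoldB_congr (c1 c2 : Int → Int) (js : List Int) (h : ∀ j ∈ js, c1 j = c2 j) :
    ∀ st : Int × Option Int,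
      js.foldl (fun st j => if c1 j > st.1 then (c1 j, some j)
        else if st.2 = none ∧ c1 j = st.1 then (st.1, some j) else st) st =
      js.foldl (fun st j => if c2 j > st.1 then (c2 j, some j)
        else if st.2 = none ∧ c2 j = st.1 then (st.1, some j) else st) st := by
  induction js with
  | nil => intro st; rfl
  | cons j js ih =>
    intro st
    have hj := h j (by simp)
    have ih' := ih (fun a ha => h a (by simp [ha]))
    simp only [List.foldl_cons]
    rw [hj, ih']

-- the values stored in dp and best_j, expressed over the FINAL dp array
theorem pvDP_values (n : Int) (x f : List Int) (hn : 0 ≤ n) (i : Int) (h1 : 1 ≤ i) (hi : i ≤ n) :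
    PySem.List.pyGetD (pvBDP n x f).1 i 0 =
      pvFoldA (pvC (pvBDP n x f).1 f (PySem.List.pyGetD x (i - 1) 0) i)
        (min (PySem.List.pyGetD f 0 0) (PySem.List.pyGetD x (i - 1) 0))
        (PySem.List.pyRange 0 i 1) ∧
    PySem.List.pyGetD (pvBDP n x f).2 i 0 =
      ((PySem.List.pyRange 0 i 1).find?
        (fun j => pvC (pvBDP n x f).1 f (PySem.List.pyGetD x (i - 1) 0) i j ==
          PySem.List.pyGetD (pvBDP n x f).1 i 0)).getD 0 := by
  have hstep : pvUpTo n x f i = pvStepB f x (pvUpTo n x f (i - 1)) i := by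
    have h := pvUpTo_succ n x f (i - 1) (by omega)
    rw [show i - 1 + 1 = i by ring] at h
    exact h
  have hlen1 : (pvUpTo n x f (i - 1)).1.length = (n + 1).toNat := (pvUpTo_lengths n x f (i - 1)).1
  have hlen2 : (pvUpTo n x f (i - 1)).2.length = (n + 1).toNat := (pvUpTo_lengths n x f (i - 1)).2
  have hc : ∀ j ∈ PySem.List.pyRange 0 i 1,
      pvC (pvUpTo n x f (i - 1)).1 f (PySem.List.pyGetD x (i - 1) 0) i j =
      pvC (pvBDP n x f).1 f (PySem.List.pyGetD x (i - 1) 0) i j := by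
    intro j hj
    have hj' := PySem.List.mem_pyRange_one.1 hj
    unfold pvC
    rw [(pvBDP_agree n x f (i - 1) (i - j - 1) (by omega) (by omega) (by omega)).1]
  have hinner : pvBInner (pvUpTo n x f (i - 1)).1 f (PySem.List.pyGetD x (i - 1) 0) i =
      pvFoldB (pvC (pvBDP n x f).1 f (PySem.List.pyGetD x (i - 1) 0) i)
        (min (PySem.List.pyGetD f 0 0) (PySem.List.pyGetD x (i - 1) 0))
        (PySem.List.pyRange 0 i 1) := by
    rw [pvBInner_eq]
    unfold pvFoldB
    exact pvFoldB_congr _ _ _ hc _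
  have hset1 : PySem.List.pyGetD (pvUpTo n x f i).1 i 0 =
      (pvBInner (pvUpTo n x f (i - 1)).1 f (PySem.List.pyGetD x (i - 1) 0) i).1 := by
    rw [hstep]
    exact pvGetD_setD_self _ _ _ (by omega) (by rw [hlen1]; omega)
  have hset2 : PySem.List.pyGetD (pvUpTo n x f i).2 i 0 =
      ((pvBInner (pvUpTo n x f (i - 1)).1 f (PySem.List.pyGetD x (i - 1) 0) i).2).getD 0 := by
    rw [hstep]
    exact pvGetD_setD_self _ _ _ (by omega) (by rw [hlen2]; omega)
  have hchar := pvFoldB_char (pvC (pvBDP n x f).1 f (PySem.List.pyGetD x (i - 1) 0) i)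
    (min (PySem.List.pyGetD f 0 0) (PySem.List.pyGetD x (i - 1) 0)) (PySem.List.pyRange 0 i 1)
  have hfst : PySem.List.pyGetD (pvBDP n x f).1 i 0 =
      pvFoldA (pvC (pvBDP n x f).1 f (PySem.List.pyGetD x (i - 1) 0) i)
        (min (PySem.List.pyGetD f 0 0) (PySem.List.pyGetD x (i - 1) 0))
        (PySem.List.pyRange 0 i 1) := by
    rw [(pvBDP_agree n x f i i (by omega) le_rfl hi).1, hset1, hinner, hchar.1]
  refine ⟨hfst, ?_⟩
  rw [(pvBDP_agree n x f i i (by omega) le_rfl hi).2, hset2, hinner, hchar.2.2.2.2, hfst]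

theorem pvDP_zero (n : Int) (x f : List Int) (hn : 0 ≤ n) :
    PySem.List.pyGetD (pvBDP n x f).1 0 0 = 0 := by
  have h := (pvBDP_agree n x f 0 0 le_rfl le_rfl hn).1
  rw [h]
  have : pvUpTo n x f 0 = (List.replicate (n + 1).toNat 0, List.replicate (n + 1).toNat 0) := by
    rw [pvUpTo, PySem.List.pyRange_one_eq_nil (by omega)]; rfl
  rw [this]
  rw [PySem.List.pyGetD_zero]
  rcases Nat.eq_zero_or_pos (n + 1).toNat with h0 | h0
  · simp [h0]
  · rw [List.getD_eq_getElem _ _ (by simpa using h0)]; simp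

theorem pvDP_AB (n : Int) (x f : List Int) : (pvBDP n x f).1 = pvADP n x f := by
  have key : ∀ (dp : List Int) (xi i : Int), (pvBInner dp f xi i).1 = pvAInner dp f xi i := by
    intro dp xi i
    rw [pvBInner_eq, pvAInner_eq]
    exact (pvFoldB_char _ _ _).1
  have h : ∀ (js : List Int) (dp bj : List Int),
      (js.foldl (pvStepB f x) (dp, bj)).1 =
      js.foldl (fun dp i => PySem.List.pySetD dp i
        (pvAInner dp f (PySem.List.pyGetD x (i - 1) 0) i)) dp := by
    intro js
    induction js with
    | nil => intro dp bj; rfl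
    | cons j js ih =>
      intro dp bj
      simp only [List.foldl_cons]
      rw [show pvStepB f x (dp, bj) j =
        (PySem.List.pySetD dp j (pvAInner dp f (PySem.List.pyGetD x (j - 1) 0) j),
         PySem.List.pySetD bj j
          (((pvBInner dp f (PySem.List.pyGetD x (j - 1) 0) j).2).getD 0)) from by
          simp only [pvStepB, key]]
      exact ih _ _
  exact h (PySem.List.pyRange 1 (n + 1) 1) _ _

theorem pvExists (n : Int) (x f : List Int) (hn : 0 ≤ n)
    (hcond : ∀ i ∈ PySem.List.pyRange 2 (n + 1) 1,
      PySem.List.pyGetD f 0 0 ≤ PySem.List.pyGetD f (i - 1) 0 ∨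
      0 ≤ min (PySem.List.pyGetD f 0 0) (PySem.List.pyGetD x (i - 2) 0) ∨
      0 ≤ min (PySem.List.pyGetD f (i - 2) 0) (PySem.List.pyGetD x (i - 2) 0)) :
    ∀ i : Int, 1 ≤ i → i ≤ n → ∃ j0,
      (PySem.List.pyRange 0 i 1).find?
        (fun j => pvC (pvBDP n x f).1 f (PySem.List.pyGetD x (i - 1) 0) i j ==
          PySem.List.pyGetD (pvBDP n x f).1 i 0) = some j0 := by
  intro i h1 h2
  rcases hfind : (PySem.List.pyRange 0 i 1).find?
      (fun j => pvC (pvBDP n x f).1 f (PySem.List.pyGetD x (i - 1) 0) i j ==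
        PySem.List.pyGetD (pvBDP n x f).1 i 0) with _ | j0
  · exfalso
    have hnone : ∀ j ∈ PySem.List.pyRange 0 i 1,
        pvC (pvBDP n x f).1 f (PySem.List.pyGetD x (i - 1) 0) i j ≠
        PySem.List.pyGetD (pvBDP n x f).1 i 0 := by
      intro j hj
      have := List.find?_eq_none.1 hfind j hj
      simpa using this
    have hval := (pvDP_values n x f hn i h1 h2).1
    have hchar := pvFoldB_char (pvC (pvBDP n x f).1 f (PySem.List.pyGetD x (i - 1) 0) i)
      (min (PySem.List.pyGetD f 0 0) (PySem.List.pyGetD x (i - 1) 0)) (PySem.List.pyRange 0 i 1)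
    obtain ⟨-, hs0, hbound, hatt, -⟩ := hchar
    have hdp0 : PySem.List.pyGetD (pvBDP n x f).1 0 0 = 0 := pvDP_zero n x f hn
    rcases hatt with hM | ⟨j, hjmem, hjeq⟩
    · -- the maximum is the seed value
      by_cases h12 : i = 1
      · subst h12
        refine hnone 0 (PySem.List.mem_pyRange_one.2 ⟨le_rfl, by omega⟩) ?_
        unfold pvC
        rw [show (1:Int) - 0 - 1 = 0 by ring, hdp0, hval, hM]
        ring
      · have hi2 : 2 ≤ i := by omega
        rcases hcond i (PySem.List.mem_pyRange_one.2 ⟨hi2, by omega⟩) with ha | hb | hc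
        · -- f[0] ≤ f[i-1]
          have hle : pvC (pvBDP n x f).1 f (PySem.List.pyGetD x (i - 1) 0) i (i - 1) ≤
              PySem.List.pyGetD (pvBDP n x f).1 i 0 := by
            rw [hval]
            exact hbound _ (PySem.List.mem_pyRange_one.2 ⟨by omega, by omega⟩)
          have hcv : pvC (pvBDP n x f).1 f (PySem.List.pyGetD x (i - 1) 0) i (i - 1) =
              min (PySem.List.pyGetD f (i - 1) 0) (PySem.List.pyGetD x (i - 1) 0) := by
            unfold pvC
            rw [show i - (i - 1) - 1 = 0 by ring, hdp0]
            ring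
          have hge : min (PySem.List.pyGetD f 0 0) (PySem.List.pyGetD x (i - 1) 0) ≤
              min (PySem.List.pyGetD f (i - 1) 0) (PySem.List.pyGetD x (i - 1) 0) :=
            min_le_min ha le_rfl
          refine hnone (i - 1) (PySem.List.mem_pyRange_one.2 ⟨by omega, by omega⟩) ?_
          rw [hval, hM] at *
          omega
        all_goals
        · -- dp[i-1] is nonnegative, so j = 0 matches the seed
          have hval' := (pvDP_values n x f hn (i - 1) (by omega) (by omega)).1
          have hchar' := pvFoldB_char
            (pvC (pvBDP n x f).1 f (PySem.List.pyGetD x (i - 2) 0) (i - 1))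
            (min (PySem.List.pyGetD f 0 0) (PySem.List.pyGetD x (i - 2) 0))
            (PySem.List.pyRange 0 (i - 1) 1)
          obtain ⟨-, hs0', hbound', -, -⟩ := hchar'
          rw [show i - 1 - 1 = i - 2 by ring] at hval'
          have hdpnn : 0 ≤ PySem.List.pyGetD (pvBDP n x f).1 (i - 1) 0 := by
            first
            | (rw [hval']; omega)
            | · have hcv' : pvC (pvBDP n x f).1 f (PySem.List.pyGetD x (i - 2) 0) (i - 1) (i - 2) =
                    min (PySem.List.pyGetD f (i - 2) 0) (PySem.List.pyGetD x (i - 2) 0) := by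
                  unfold pvC
                  rw [show i - 1 - (i - 2) - 1 = 0 by ring, hdp0]
                  ring
                have := hbound' (i - 2) (PySem.List.mem_pyRange_one.2 ⟨by omega, by omega⟩)
                rw [hval', hcv'] at *
                omega
          have hc0 : pvC (pvBDP n x f).1 f (PySem.List.pyGetD x (i - 1) 0) i 0 =
              PySem.List.pyGetD (pvBDP n x f).1 (i - 1) 0 +
              min (PySem.List.pyGetD f 0 0) (PySem.List.pyGetD x (i - 1) 0) := by
            unfold pvC
            rw [show i - 0 - 1 = i - 1 by ring]
          have hle0 : pvC (pvBDP n x f).1 f (PySem.List.pyGetD x (i - 1) 0) i 0 ≤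
              PySem.List.pyGetD (pvBDP n x f).1 i 0 := by
            rw [hval]
            exact hbound _ (PySem.List.mem_pyRange_one.2 ⟨le_rfl, by omega⟩)
          refine hnone 0 (PySem.List.mem_pyRange_one.2 ⟨le_rfl, by omega⟩) ?_
          rw [hval, hM] at *
          omega
    · exact hnone j hjmem (by rw [hval]; exact hjeq)
  · exact ⟨j0, rfl⟩

theorem pvRecon_eq (n : Int) (x f : List Int) (hn : 0 ≤ n)
    (hex : ∀ i : Int, 1 ≤ i → i ≤ n → ∃ j0,
      (PySem.List.pyRange 0 i 1).find?
        (fun j => pvC (pvBDP n x f).1 f (PySem.List.pyGetD x (i - 1) 0) i j ==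
          PySem.List.pyGetD (pvBDP n x f).1 i 0) = some j0) :
    ∀ (fuel : Nat) (i : Int), 0 ≤ i → i ≤ n →
      pvARecon (pvBDP n x f).1 x f fuel i = pvBRecon (pvBDP n x f).2 fuel i := by
  intro fuel
  induction fuel with
  | zero => intro i _ _; rfl
  | succ fuel ih =>
    intro i h0 h2
    by_cases hi : i > 0
    · obtain ⟨j0, hj0⟩ := hex i (by omega) h2
      have hj0mem := PySem.List.mem_pyRange_one.1 (List.mem_of_find?_eq_some hj0)
      have hbj : PySem.List.pyGetD (pvBDP n x f).2 i 0 = j0 := by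
        rw [(pvDP_values n x f hn i (by omega) h2).2, hj0]
        rfl
      have hcount : ((PySem.List.pyRange 0 i 1).takeWhile
          (fun j => !(pvC (pvBDP n x f).1 f (PySem.List.pyGetD x (i - 1) 0) i j ==
            PySem.List.pyGetD (pvBDP n x f).1 i 0))).length = j0.toNat := by
        have := pvTakeWhile_length_pyRange _ (i - 0).toNat 0 i j0 rfl hj0
        rw [this]
        omega
      simp only [pvARecon, pvBRecon, if_pos hi]
      rw [pvAFind_eq, hj0, hbj]
      simp only [Option.map_some]
      rw [pvMap_const_cargar, hcount, ih (i - j0 - 1) (by omega) (by omega)]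
    · simp only [pvARecon, pvBRecon, if_neg hi]

-- ===== VERDICT (by name: the statement is the Claim_ definition above) =====
theorem eliminar_enemigos_spec : Claim_equal_eliminar_enemigos := by
  intro n x f _hDom hPre
  obtain ⟨hn, _hx, _hf, hcond⟩ := hPre
  unfold Spec_eliminar_enemigos
  show eliminar_enemigos n x f = eliminar_enemigos_alt n x f
  show (PySem.List.pyGetD (pvADP n x f) (-1) 0, (pvARecon (pvADP n x f) x f n.toNat n).reverse) =
    (PySem.List.pyGetD (pvBDP n x f).1 n 0, (pvBRecon (pvBDP n x f).2 n.toNat n).reverse)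
  rw [← pvDP_AB]
  have hlen : (pvBDP n x f).1.length = (n + 1).toNat := by
    rw [pvBDP_eq_upTo]
    exact (pvUpTo_lengths n x f n).1
  have hgen : ∀ l : List Int, l.length = (n + 1).toNat →
      PySem.List.pyGetD l (-1) 0 = PySem.List.pyGetD l n 0 := by
    intro l hl
    have hne : l ≠ [] := by
      intro h
      rw [h] at hl
      simp at hl
      omega
    rw [PySem.List.pyGetD_neg_one _ _ hne]
    rw [show n = ((n.toNat : Nat) : Int) by omega, PySem.List.pyGetD_natCast]
    rw [List.getD_eq_getElem _ _ (by omega), List.getLast_eq_getElem]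
    congr 1
    omega
  have hfst := hgen _ hlen
  rw [hfst, pvRecon_eq n x f hn (pvExists n x f hn hcond) n.toNat n (by omega) le_rfl]
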